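-- pv_equiv track=rewrite | github.com/iimmuunnee/baekjoon-programmers | 프로그래머스/0/181906. 접두사인지 확인하기/접두사인지 확인하기.py | solution
-- ===== SOURCE A (Python) =====
-- def solution(my_string, is_prefix):
--     answer = 1
--     len_word = 0
--     if len(my_string) >= len(is_prefix):
--         len_word = len(is_prefix)
--     else:
--         answer = 0
--         return answer
--
--     for i in range(len_word):
--         if my_string[i] != is_prefix[i]:
--             answer = 0
--             break
--
--     return answer
-- ===== SOURCE B (Python) =====
-- def solution(my_string, is_prefix):
--     return int(my_string[:len(is_prefix)] == is_prefix)
-- ===== Notes on version B (the rewrite author's own statement) =====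
-- stated objective: simpler
-- what changed: Replaces the explicit length guard plus character-by-character index loop with a single truncating-slice comparison returned through int().
import Mathlib
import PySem

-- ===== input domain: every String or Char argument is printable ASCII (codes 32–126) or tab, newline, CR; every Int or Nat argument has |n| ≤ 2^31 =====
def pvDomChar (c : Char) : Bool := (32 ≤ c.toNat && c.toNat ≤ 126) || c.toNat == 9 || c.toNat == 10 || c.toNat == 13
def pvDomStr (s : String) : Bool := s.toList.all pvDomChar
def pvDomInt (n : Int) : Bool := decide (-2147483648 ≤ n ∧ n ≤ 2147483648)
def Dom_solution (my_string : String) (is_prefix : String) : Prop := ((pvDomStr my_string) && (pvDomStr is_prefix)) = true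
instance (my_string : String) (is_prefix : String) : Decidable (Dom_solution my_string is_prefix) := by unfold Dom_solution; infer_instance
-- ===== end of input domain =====

-- B replaces A's length guard and index loop by a single truncating-slice comparison (objective: simpler).

-- ===== PORT A =====
-- the 'for i in range(len_word): if my_string[i] != is_prefix[i]: answer = 0; break' loop:
-- k iterations remain, current index i; returning 0 models the break
def solutionGo (my pre : List Char) : Nat → Nat → Int
  | _, 0 => 1
  | i, k + 1 =>
    if PySem.List.pyGet? my (i : Int) ≠ PySem.List.pyGet? pre (i : Int) then 0
    else solutionGo my pre (i + 1) k

def solution (my_string : String) (is_prefix : String) : Int :=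
  let m := my_string.toList
  let p := is_prefix.toList
  if p.length ≤ m.length then solutionGo m p 0 p.length else 0

-- ===== PORT B =====
-- int(my_string[:len(is_prefix)] == is_prefix)
def solution_alt (my_string : String) (is_prefix : String) : Int :=
  if PySem.List.slice my_string.toList none (some (is_prefix.toList.length : Int))
       = is_prefix.toList then 1 else 0

-- ===== PRECONDITION & SPEC =====
def Spec_solution (my_string : String) (is_prefix : String) (out : Int) : Prop := out = solution_alt my_string is_prefix
instance (my_string : String) (is_prefix : String) (out : Int) : Decidable (Spec_solution my_string is_prefix out) := by unfold Spec_solution; infer_instance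

-- ===== CLAIM (what is proved, stated in full; the proofs are below) =====
def Claim_equal_solution : Prop := ∀ (my_string : String) (is_prefix : String), Dom_solution my_string is_prefix → Spec_solution my_string is_prefix (solution my_string is_prefix)

-- ===== LEMMAS AND PROOFS =====

theorem solutionGo_eq_take (my pre : List Char) :
    ∀ (k i : Nat), i + k ≤ pre.length → pre.length ≤ my.length →
      solutionGo my pre i k =
        if (my.drop i).take k = (pre.drop i).take k then 1 else 0 := by
  intro k
  induction k with
  | zero => intro i _ _; simp [solutionGo]
  | succ k ih =>
    intro i hik hlen
    have hip : i < pre.length := by omega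
    have him : i < my.length := by omega
    have hmy : (my.drop i).take (k + 1) = my[i] :: ((my.drop (i + 1)).take k) := by
      rw [List.drop_eq_getElem_cons him]; rfl
    have hpre : (pre.drop i).take (k + 1) = pre[i] :: ((pre.drop (i + 1)).take k) := by
      rw [List.drop_eq_getElem_cons hip]; rfl
    have hg1 : PySem.List.pyGet? my (i : Int) = some my[i] := by
      simp [PySem.List.pyGet?_natCast, List.getElem?_eq_getElem him]
    have hg2 : PySem.List.pyGet? pre (i : Int) = some pre[i] := by
      simp [PySem.List.pyGet?_natCast, List.getElem?_eq_getElem hip]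
    rw [solutionGo, hg1, hg2, hmy, hpre]
    by_cases h : my[i] = pre[i]
    · simp only [h, ne_eq, not_true_eq_false, ite_false]
      rw [ih (i + 1) (by omega) hlen]
      simp
    · simp [h]

theorem solution_spec : Claim_equal_solution := by
  intro my_string is_prefix _
  unfold Spec_solution solution solution_alt
  simp only []
  set m := my_string.toList
  set p := is_prefix.toList
  rw [PySem.List.slice_to_natCast]
  by_cases h : p.length ≤ m.length
  · rw [if_pos h]
    have := solutionGo_eq_take m p p.length 0 (by omega) h
    simpa using this
  · rw [if_neg h]
    have hne : m.take p.length ≠ p := by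
      intro he
      have := congrArg List.length he
      simp at this
      omega
    rw [if_neg hne]
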